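-- pv_equiv track=rewrite | github.com/mhee167/coding_test | 코딩테스트합격자되기/해시/신고결과받기.py | solution
-- ===== SOURCE A (Python) =====
-- def solution(id_list, report,k):
--     reported_user= {} #신고당한 유저
--     count={} #각 유저가 받을 메일 개수
--
--     # 신고당한 유저별로 신고한 유저 저장
--     # 신고당한 유저만 저장하기 때문에 더 효율적!
--     for r in report:
--         user_id, reported_id = r.split()
--         if reported_id not in reported_user:
--             reported_user[reported_id] = set()
--         reported_user[reported_id].add(user_id)
--
--     for reported_id, user_id_lst in reported_user.items():
--         if len(user_id_lst) >=k: #k번 이상이면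
--             for uid in user_id_lst:
--                 if uid not in count:
--                     count[uid]=1
--                 else:
--                     count[uid]+=1
--     answer=[]
--
--     for i in range(len(id_list)):
--         if id_list[i] not in count:
--             answer.append(0)
--         else:
--             answer.append(count[id_list[i]])
--     #이렇게 가능
--     # for uid in user_id_lst:
--     #   count[uid]= count.get(uid,0)+1 #실행이 반복될때마다 값이 1 더해짐
--     return answer
-- ===== SOURCE B (Python) =====
-- def solution(id_list, report, k):
--     # deduplicated (reporter, reported) pairs, in first-occurrence order; no dict/set tables
--     pairs = []
--     for r in report:
--         u, v = r.split()
--         if (u, v) not in pairs: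
--             pairs.append((u, v))
--     # a user is banned if at least k deduplicated reports name them (counted by a direct scan)
--     banned = {v for _, v in pairs if sum(w == v for _, w in pairs) >= k}
--     # each answer element computed directly: how many banned users this uid reported
--     return [sum(v in banned for u, v in pairs if u == uid) for uid in id_list]
-- ===== Notes on version B (the rewrite author's own statement) =====
-- stated objective: alternative
-- what changed: Drops A's dict-of-sets grouping and mail-count dict entirely: B keeps one deduplicated pair list, decides bans by a direct counting scan over that list, and computes every answer element independently with a per-uid comprehension instead of accumulating counts.
import Mathlib
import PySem

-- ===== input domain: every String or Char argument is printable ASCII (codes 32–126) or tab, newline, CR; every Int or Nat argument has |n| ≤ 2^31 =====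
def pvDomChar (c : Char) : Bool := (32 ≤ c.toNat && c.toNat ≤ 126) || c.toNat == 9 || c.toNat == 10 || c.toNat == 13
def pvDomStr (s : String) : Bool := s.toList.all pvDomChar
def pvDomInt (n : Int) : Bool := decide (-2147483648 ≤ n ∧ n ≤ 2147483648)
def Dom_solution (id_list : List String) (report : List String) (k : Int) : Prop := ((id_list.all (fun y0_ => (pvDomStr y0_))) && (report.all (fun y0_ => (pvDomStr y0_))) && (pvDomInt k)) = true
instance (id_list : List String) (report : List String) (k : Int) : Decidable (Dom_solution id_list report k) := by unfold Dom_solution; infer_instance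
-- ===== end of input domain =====

-- B drops A's dict-of-sets grouping and mail-count dict: it keeps one deduplicated pair
-- list, decides bans by a direct counting scan over that list, and computes every answer
-- element independently per uid (alternative decomposition; B is asymptotically slower).

-- ===== PORT A =====
def solution (id_list : List String) (report : List String) (k : Int) : List Int :=
  let reported_user : PySem.Dict String (PySem.Set String) :=
    report.foldl (fun d r =>
      match PySem.Str.split₀ r with
      | [user_id, reported_id] =>
        let d1 := if d.contains reported_id then d else d.insert reported_id PySem.Set.empty
        d1.modify reported_id PySem.Set.empty (fun s => PySem.Set.add s user_id)
      | _ => d) PySem.Dict.empty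
  let count : PySem.Dict String Int :=
    reported_user.items.foldl (fun c pr =>
      if k ≤ (pr.2.length : Int) then
        pr.2.foldl (fun c uid =>
          if c.contains uid = false then c.insert uid 1
          else c.insert uid (c.getD uid 0 + 1)) c
      else c) PySem.Dict.empty
  (PySem.List.pyRange 0 (PySem.List.len id_list)).foldl (fun ans i =>
      if count.contains (PySem.List.pyGetD id_list i "") = false then ans ++ [0]
      else ans ++ [count.getD (PySem.List.pyGetD id_list i "") 0]) []

-- ===== PORT B =====
def solution_alt (id_list : List String) (report : List String) (k : Int) : List Int :=
  -- pairs: 'if (u, v) not in pairs: pairs.append((u, v))'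
  let pairs : List (String × String) :=
    report.foldl (fun ps r =>
      let parts := PySem.Str.split₀ r
      let p := (parts.getD 0 "", parts.getD 1 "")
      if ps.contains p then ps else ps ++ [p]) []
  -- banned: set comprehension; 'sum(w == v for _, w in pairs)' is a 0/1-sum over the scan
  let banned : PySem.Set String :=
    PySem.Set.ofList ((pairs.filter (fun p =>
      decide (k ≤ (pairs.map (fun q => if q.2 == p.2 then (1 : Int) else 0)).sum))).map Prod.snd)
  -- '[sum(v in banned for u, v in pairs if u == uid) for uid in id_list]'
  id_list.map (fun uid =>
    ((pairs.filter (fun p => p.1 == uid)).map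
      (fun p => if banned.contains p.2 then (1 : Int) else 0)).sum)

-- ===== PRECONDITION & SPEC =====
-- Pre_ excludes exactly the reports that do not split into two whitespace-separated
-- words, on which A's tuple unpacking 'user_id, reported_id = r.split()' raises ValueError
-- (B's identical unpacking raises there too).
def Pre_solution (id_list : List String) (report : List String) (k : Int) : Prop :=
  ∀ r ∈ report, (PySem.Str.split₀ r).length = 2
instance (id_list : List String) (report : List String) (k : Int) : Decidable (Pre_solution id_list report k) := by unfold Pre_solution; infer_instance

def pvWitness_solution : List String × List String × Int :=
  (["muzi", "frodo", "apeach"], ["muzi frodo", "apeach frodo", "muzi frodo"], 2)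

def Spec_solution (id_list : List String) (report : List String) (k : Int) (out : List Int) : Prop := out = solution_alt id_list report k
instance (id_list : List String) (report : List String) (k : Int) (out : List Int) : Decidable (Spec_solution id_list report k out) := by unfold Spec_solution; infer_instance

-- ===== CLAIM (what is proved, stated in full; the proofs are below) =====
def Claim_equal_solution : Prop := ∀ (id_list : List String) (report : List String) (k : Int), Dom_solution id_list report k → Pre_solution id_list report k → Spec_solution id_list report k (solution id_list report k)

-- ===== LEMMAS AND PROOFS =====

-- parsing a report line that Pre_ admits
def pvParse (r : String) : String × String :=
  ((PySem.Str.split₀ r).getD 0 "", (PySem.Str.split₀ r).getD 1 "")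

lemma pv_split_two {r : String} (h : (PySem.Str.split₀ r).length = 2) :
    PySem.Str.split₀ r = [(pvParse r).1, (pvParse r).2] := by
  unfold pvParse
  rcases hs : PySem.Str.split₀ r with _ | ⟨u, _ | ⟨v, _ | _⟩⟩ <;> simp_all

-- A's grouping step, on a parsed pair
def pvGroup (d : PySem.Dict String (PySem.Set String)) (p : String × String) :
    PySem.Dict String (PySem.Set String) :=
  let d1 := if d.contains p.2 then d else d.insert p.2 PySem.Set.empty
  d1.modify p.2 PySem.Set.empty (fun s => PySem.Set.add s p.1)

lemma pvGroup_getD (d : PySem.Dict String (PySem.Set String)) (p : String × String) (w : String) :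
    (pvGroup d p).getD w PySem.Set.empty =
      if w = p.2 then (d.getD p.2 PySem.Set.empty).add p.1 else d.getD w PySem.Set.empty := by
  unfold pvGroup
  by_cases hc : d.contains p.2 = true
  · simp [hc, PySem.Dict.getD_modify]
  · simp only [Bool.not_eq_true] at hc
    simp [hc, PySem.Dict.getD_modify, PySem.Dict.getD_insert]
    split_ifs with h
    · simp [PySem.Dict.getD_of_not_contains d _ hc, PySem.Set.add, PySem.Set.contains]
    · rfl

lemma pvGroup_keys (d : PySem.Dict String (PySem.Set String)) (p : String × String) :
    (pvGroup d p).keys = PySem.Set.add d.keys p.2 := by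
  unfold pvGroup
  by_cases hc : d.contains p.2 = true
  · have hm : p.2 ∈ d.keys := (PySem.Dict.contains_iff_mem_keys d p.2).mp hc
    simp [hc, PySem.Dict.keys_modify, PySem.Dict.keys_insert_of_contains d _ hc,
      PySem.Set.add, PySem.Set.contains, hm]
  · simp only [Bool.not_eq_true] at hc
    have hm : ¬ p.2 ∈ d.keys := fun h => by
      simp [(PySem.Dict.contains_iff_mem_keys d p.2).mpr h] at hc
    simp only [hc, PySem.Dict.keys_modify, Bool.false_eq_true, if_false]
    rw [PySem.Dict.insert_insert_self]
    simp [PySem.Dict.keys_insert_of_not_contains d _ hc, PySem.Set.add, PySem.Set.contains, hm]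

lemma pvGroup_fold_getD (L : List (String × String)) (d : PySem.Dict String (PySem.Set String)) (w : String) :
    (L.foldl pvGroup d).getD w PySem.Set.empty =
      PySem.Set.update (d.getD w PySem.Set.empty) ((L.filter (fun p => p.2 == w)).map Prod.fst) := by
  induction L generalizing d with
  | nil => simp [PySem.Set.update]
  | cons p L ih =>
    simp only [List.foldl_cons, ih (pvGroup d p), pvGroup_getD, List.filter_cons]
    by_cases hp : p.2 = w
    · subst hp
      simp [PySem.Set.update]
    · have : (p.2 == w) = false := by simp [hp]
      rw [if_neg (fun h => hp (Eq.symm h))]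
      simp [this]

lemma pvGroup_fold_keys (L : List (String × String)) (d : PySem.Dict String (PySem.Set String)) :
    (L.foldl pvGroup d).keys = PySem.Set.update d.keys (L.map Prod.snd) := by
  induction L generalizing d with
  | nil => simp [PySem.Set.update]
  | cons p L ih =>
    simp only [List.foldl_cons, ih (pvGroup d p), pvGroup_keys, List.map_cons]
    simp [PySem.Set.update]

-- A's inner mail-counting loop is a plain counting loop
lemma pvInner_eq (c : PySem.Dict String Int) (s : List String) :
    s.foldl (fun c uid =>
        if c.contains uid = false then c.insert uid 1
        else c.insert uid (c.getD uid 0 + 1)) c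
      = s.foldl (fun c uid => c.insert uid (c.getD uid 0 + 1)) c := by
  apply PySem.List.foldl_congr_mem
  intro c uid _
  by_cases hc : c.contains uid = true
  · simp [hc]
  · simp only [Bool.not_eq_true] at hc
    simp [hc, PySem.Dict.getD_of_not_contains c _ hc]

lemma pvOuter_getD (k : Int) (items : List (String × PySem.Set String)) (c : PySem.Dict String Int) (u : String) :
    (items.foldl (fun c pr =>
        if k ≤ (pr.2.length : Int) then
          pr.2.foldl (fun c uid =>
            if c.contains uid = false then c.insert uid 1
            else c.insert uid (c.getD uid 0 + 1)) c
        else c) c).getD u 0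
      = c.getD u 0 + ((items.map (fun pr =>
          if k ≤ (pr.2.length : Int) then (pr.2.count u : Int) else 0)).sum) := by
  induction items generalizing c with
  | nil => simp
  | cons pr items ih =>
    simp only [List.foldl_cons, ih, List.map_cons, List.sum_cons]
    by_cases hk : k ≤ (pr.2.length : Int)
    · simp only [if_pos hk, pvInner_eq, PySem.Dict.getD_foldl_insert_add_one]
      omega
    · simp only [if_neg hk]
      omega

lemma pv_len_eq_of_nodup {α : Type} [DecidableEq α] {l₁ l₂ : List α}
    (h₁ : l₁.Nodup) (h₂ : l₂.Nodup) (h : ∀ x, x ∈ l₁ ↔ x ∈ l₂) : l₁.length = l₂.length := by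
  rw [← List.toFinset_card_of_nodup h₁, ← List.toFinset_card_of_nodup h₂]
  congr 1; ext x; simp [h x]

-- number of distinct reporters of v = multiplicity of v among the seconds of the pair set
lemma pv_count_snd (L : List (String × String)) (v : String) :
    (((PySem.Set.ofList L).map Prod.snd).count v : Nat)
      = (PySem.Set.ofList ((L.filter (fun p => p.2 == v)).map Prod.fst)).length := by
  have hP : (PySem.Set.ofList L).Nodup := PySem.Set.nodup_ofList L
  have hfil : ((PySem.Set.ofList L).filter (fun p => p.2 == v)).Nodup := hP.filter _
  have hmapn : (((PySem.Set.ofList L).filter (fun p => p.2 == v)).map Prod.fst).Nodup := by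
    refine hfil.map_on ?_
    intro x hx y hy hxy
    have hx2 : x.2 = v := by simpa using (List.of_mem_filter hx)
    have hy2 : y.2 = v := by simpa using (List.of_mem_filter hy)
    exact Prod.ext hxy (hx2.trans hy2.symm)
  have : (((PySem.Set.ofList L).map Prod.snd).count v : Nat)
      = (((PySem.Set.ofList L).filter (fun p => p.2 == v)).map Prod.fst).length := by
    show (((PySem.Set.ofList L).map Prod.snd).countP (· == v)) = _
    rw [List.countP_map, List.countP_eq_length_filter, List.length_map]
    rfl
  rw [this]
  refine pv_len_eq_of_nodup hmapn (PySem.Set.nodup_ofList _) ?_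
  intro u
  simp only [List.mem_map, List.mem_filter, PySem.Set.mem_ofList, beq_iff_eq]

-- the combinatorial core: A's per-user sum over grouped sets equals a count over the pair set
lemma pv_core (L : List (String × String)) (k : Int) (u : String) :
    ((PySem.Set.ofList (L.map Prod.snd)).map (fun v =>
        if k ≤ ((PySem.Set.ofList ((L.filter (fun p => p.2 == v)).map Prod.fst)).length : Int)
        then ((PySem.Set.ofList ((L.filter (fun p => p.2 == v)).map Prod.fst)).count u : Int) else 0)).sum
      = ((((PySem.Set.ofList L).filter (fun p =>
            decide (k ≤ (((PySem.Set.ofList L).map Prod.snd).count p.2 : Int)))).map Prod.fst).count u : Int) := by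
  have hP : (PySem.Set.ofList L).Nodup := PySem.Set.nodup_ofList L
  have hK : (PySem.Set.ofList (L.map Prod.snd)).Nodup := PySem.Set.nodup_ofList _
  set cond : String → Prop := fun v => k ≤ ((((PySem.Set.ofList L).map Prod.snd)).count v : Int) with hcond
  have hterm : ∀ v, (if k ≤ ((PySem.Set.ofList ((L.filter (fun p => p.2 == v)).map Prod.fst)).length : Int)
        then ((PySem.Set.ofList ((L.filter (fun p => p.2 == v)).map Prod.fst)).count u : Int) else 0)
      = if (decide (cond v) && decide ((u, v) ∈ L)) = true then 1 else 0 := by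
    intro v
    rw [← pv_count_snd L v]
    by_cases hcv : cond v
    · rw [if_pos (by exact_mod_cast hcv)]
      by_cases hm : (u, v) ∈ L
      · have hmem : u ∈ PySem.Set.ofList ((L.filter (fun p => p.2 == v)).map Prod.fst) := by
          rw [PySem.Set.mem_ofList]
          exact List.mem_map.mpr ⟨(u, v), List.mem_filter.mpr ⟨hm, by simp⟩, rfl⟩
        rw [List.count_eq_one_of_mem (PySem.Set.nodup_ofList _) hmem]
        simp [hcv, hm]
      · have hmem : u ∉ PySem.Set.ofList ((L.filter (fun p => p.2 == v)).map Prod.fst) := by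
          rw [PySem.Set.mem_ofList]
          intro h
          obtain ⟨p, hpf, hp1⟩ := List.mem_map.mp h
          obtain ⟨hpL, hp2⟩ := List.mem_filter.mp hpf
          have hpv : (u, v) = p :=
            Prod.ext hp1.symm ((by simpa using hp2 : p.2 = v)).symm
          exact hm (hpv ▸ hpL)
        rw [List.count_eq_zero_of_not_mem hmem]
        simp [hm]
    · rw [if_neg (by exact_mod_cast hcv)]
      simp [hcv]
  rw [List.map_congr_left (fun v _ => hterm v)]
  rw [PySem.List.sum_map_ite_one_zero]
  have hrhs : ((((PySem.Set.ofList L).filter (fun p => decide (cond p.2))).map Prod.fst).count u : Nat)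
      = (PySem.Set.ofList L).countP (fun p => (p.1 == u) && decide (cond p.2)) := by
    show (((PySem.Set.ofList L).filter (fun p => decide (cond p.2))).map Prod.fst).countP (· == u) = _
    rw [List.countP_map, List.countP_filter]
    rfl
  rw [show ((((PySem.Set.ofList L).filter (fun p =>
        decide (k ≤ (((PySem.Set.ofList L).map Prod.snd).count p.2 : Int)))).map Prod.fst).count u) =
      (PySem.Set.ofList L).countP (fun p => (p.1 == u) && decide (cond p.2)) from hrhs]
  congr 1
  rw [List.countP_eq_length_filter, List.countP_eq_length_filter]
  have hl : ((PySem.Set.ofList L).filter (fun p => (p.1 == u) && decide (cond p.2))).Nodup := hP.filter _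
  have hrn : (((PySem.Set.ofList L).filter (fun p => (p.1 == u) && decide (cond p.2))).map Prod.snd).Nodup := by
    refine hl.map_on ?_
    intro x hx y hy hxy
    have hx1 : x.1 = u := by have := List.of_mem_filter hx; simp at this; exact this.1
    have hy1 : y.1 = u := by have := List.of_mem_filter hy; simp at this; exact this.1
    exact Prod.ext (hx1.trans hy1.symm) hxy
  rw [show (((PySem.Set.ofList L).filter (fun p => (p.1 == u) && decide (cond p.2)))).length
      = (((PySem.Set.ofList L).filter (fun p => (p.1 == u) && decide (cond p.2))).map Prod.snd).length
    by rw [List.length_map]]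
  refine pv_len_eq_of_nodup (hK.filter _) hrn ?_
  intro v
  simp only [List.mem_filter, List.mem_map, PySem.Set.mem_ofList, Bool.and_eq_true, decide_eq_true_eq, beq_iff_eq]
  constructor
  · rintro ⟨_, hcv, hmL⟩
    exact ⟨(u, v), ⟨hmL, rfl, hcv⟩, rfl⟩
  · rintro ⟨p, ⟨hpP, hp1, hcv⟩, hp2⟩
    subst hp2
    refine ⟨⟨p, hpP, rfl⟩, hcv, ?_⟩
    rw [← hp1]
    exact hpP

-- A in closed form: the per-user mail count as a sum over the grouped report sets
lemma solution_eq_map (id_list : List String) (report : List String) (k : Int)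
    (hpre : ∀ r ∈ report, (PySem.Str.split₀ r).length = 2) :
    solution id_list report k = id_list.map (fun u =>
      ((PySem.Set.ofList ((report.map pvParse).map Prod.snd)).map (fun v =>
        if k ≤ ((PySem.Set.ofList (((report.map pvParse).filter (fun p => p.2 == v)).map Prod.fst)).length : Int)
        then ((PySem.Set.ofList (((report.map pvParse).filter (fun p => p.2 == v)).map Prod.fst)).count u : Int)
        else 0)).sum) := by
  unfold solution
  dsimp only
  have hgroup : report.foldl (fun d r =>
      match PySem.Str.split₀ r with
      | [user_id, reported_id] =>
        let d1 := if d.contains reported_id then d else d.insert reported_id PySem.Set.empty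
        d1.modify reported_id PySem.Set.empty (fun s => PySem.Set.add s user_id)
      | _ => d) PySem.Dict.empty
    = (report.map pvParse).foldl pvGroup PySem.Dict.empty := by
    rw [List.foldl_map]
    apply PySem.List.foldl_congr_mem
    intro acc r hr
    rw [pv_split_two (hpre r hr)]
    rfl
  rw [hgroup]
  set ru := (report.map pvParse).foldl pvGroup PySem.Dict.empty with hru
  have hkeys : ru.keys = PySem.Set.ofList ((report.map pvParse).map Prod.snd) := by
    rw [hru, pvGroup_fold_keys]
    simp [PySem.Set.update, PySem.Set.ofList_eq_foldl]
  have hval : ∀ v, ru.getD v PySem.Set.empty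
      = PySem.Set.ofList (((report.map pvParse).filter (fun p => p.2 == v)).map Prod.fst) := by
    intro v
    rw [hru, pvGroup_fold_getD]
    simp [PySem.Set.update, PySem.Set.ofList_eq_foldl]
  have hnd : ru.keys.Nodup := by rw [hkeys]; exact PySem.Set.nodup_ofList _
  rw [PySem.Dict.items_eq_map_keys ru hnd PySem.Set.empty, hkeys]
  set cnt : PySem.Dict String Int := ((PySem.Set.ofList ((report.map pvParse).map Prod.snd)).map
      (fun v => (v, ru.getD v PySem.Set.empty))).foldl (fun c pr =>
        if k ≤ (pr.2.length : Int) then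
          pr.2.foldl (fun c uid =>
            if c.contains uid = false then c.insert uid 1
            else c.insert uid (c.getD uid 0 + 1)) c
        else c) PySem.Dict.empty with hcnt
  have hcv : ∀ u, cnt.getD u 0 =
      ((PySem.Set.ofList ((report.map pvParse).map Prod.snd)).map (fun v =>
        if k ≤ ((PySem.Set.ofList (((report.map pvParse).filter (fun p => p.2 == v)).map Prod.fst)).length : Int)
        then ((PySem.Set.ofList (((report.map pvParse).filter (fun p => p.2 == v)).map Prod.fst)).count u : Int)
        else 0)).sum := by
    intro u
    rw [hcnt, pvOuter_getD, List.map_map]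
    simp only [PySem.Dict.getD_empty, Function.comp_def, hval]
    omega
  -- the answer-building loop over range(len(id_list)) is a plain map
  have hloop : (PySem.List.pyRange 0 (PySem.List.len id_list)).foldl (fun ans i =>
        if cnt.contains (PySem.List.pyGetD id_list i "") = false then ans ++ [0]
        else ans ++ [cnt.getD (PySem.List.pyGetD id_list i "") 0]) []
      = (PySem.List.pyRange 0 (PySem.List.len id_list)).foldl (fun ans i =>
          ans ++ [cnt.getD (PySem.List.pyGetD id_list i "") 0]) [] := by
    apply PySem.List.foldl_congr_mem
    intro acc i _
    by_cases hc : cnt.contains (PySem.List.pyGetD id_list i "") = true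
    · simp [hc]
    · simp only [Bool.not_eq_true] at hc
      simp [hc, PySem.Dict.getD_of_not_contains cnt _ hc]
  rw [hloop, PySem.List.foldl_append_singleton_eq_map, List.nil_append]
  rw [show (PySem.List.pyRange 0 (PySem.List.len id_list)).map
        (fun i => cnt.getD (PySem.List.pyGetD id_list i "") 0)
      = ((PySem.List.pyRange 0 (PySem.List.len id_list)).map
          (fun j => PySem.List.pyGetD id_list j "")).map (fun key => cnt.getD key 0)
    by simp [Function.comp]]
  rw [PySem.List.map_pyGetD_pyRange_zero]
  exact List.map_congr_left (fun u _ => hcv u)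

-- B in closed form: the per-user mail count as a count over the filtered pair set
lemma solution_alt_eq_map (id_list : List String) (report : List String) (k : Int) :
    solution_alt id_list report k = id_list.map (fun u =>
      ((((PySem.Set.ofList (report.map pvParse)).filter (fun p =>
          decide (k ≤ (((PySem.Set.ofList (report.map pvParse)).map Prod.snd).count p.2 : Int)))).map
        Prod.fst).count u : Int)) := by
  unfold solution_alt
  dsimp only
  have hpairs : report.foldl (fun ps r =>
      let parts := PySem.Str.split₀ r
      let p := (parts.getD 0 "", parts.getD 1 "")
      if ps.contains p then ps else ps ++ [p]) ([] : List (String × String))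
    = PySem.Set.ofList (report.map pvParse) := by
    rw [PySem.Set.ofList_eq_foldl, List.foldl_map]
    rfl
  rw [hpairs]
  set P := PySem.Set.ofList (report.map pvParse) with hPdef
  set cond : String × String → Bool :=
    fun p => decide (k ≤ ((P.map Prod.snd).count p.2 : Int)) with hconddef
  have hsum : ∀ p : String × String,
      (P.map (fun q => if q.2 == p.2 then (1 : Int) else 0)).sum
        = ((P.map Prod.snd).count p.2 : Int) := by
    intro p
    rw [show (P.map (fun q => if q.2 == p.2 then (1 : Int) else 0))
          = (P.map (fun q => if (q.2 == p.2) = true then (1 : Int) else 0))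
      by simp]
    rw [PySem.List.sum_map_ite_one_zero]
    congr 1
    show P.countP (fun q => q.2 == p.2) = (P.map Prod.snd).countP (· == p.2)
    rw [List.countP_map]
    rfl
  have hban : (P.filter (fun p =>
        decide (k ≤ (P.map (fun q => if q.2 == p.2 then (1 : Int) else 0)).sum)))
      = P.filter cond := by
    apply List.filter_congr
    intro p _
    simp only [hsum p, hconddef]
  rw [hban]
  have hmemban : ∀ p ∈ P,
      (PySem.Set.ofList ((P.filter cond).map Prod.snd)).contains p.2 = cond p := by
    intro p hp
    by_cases hc : cond p = true
    · have : p.2 ∈ PySem.Set.ofList ((P.filter cond).map Prod.snd) := by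
        rw [PySem.Set.mem_ofList]
        exact List.mem_map.mpr ⟨p, List.mem_filter.mpr ⟨hp, hc⟩, rfl⟩
      simp [PySem.Set.contains, this, hc]
    · have : p.2 ∉ PySem.Set.ofList ((P.filter cond).map Prod.snd) := by
        rw [PySem.Set.mem_ofList]
        intro h
        obtain ⟨q, hqf, hq2⟩ := List.mem_map.mp h
        have hqc : cond q = true := (List.mem_filter.mp hqf).2
        have : cond q = cond p := by
          simp only [hconddef, hq2]
        exact hc (this ▸ hqc)
      simp only [Bool.not_eq_true] at hc
      simp [PySem.Set.contains, this, hc]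
  apply List.map_congr_left
  intro u _
  have hrepl : ((P.filter (fun p => p.1 == u)).map
        (fun p => if (PySem.Set.ofList ((P.filter cond).map Prod.snd)).contains p.2
                  then (1 : Int) else 0))
      = ((P.filter (fun p => p.1 == u)).map
        (fun p => if cond p = true then (1 : Int) else 0)) := by
    apply List.map_congr_left
    intro p hp
    rw [hmemban p (List.mem_of_mem_filter hp)]
  rw [hrepl, PySem.List.sum_map_ite_one_zero]
  rw [List.countP_filter]
  have hr : ((((P.filter cond)).map Prod.fst).count u : Nat)
      = P.countP (fun p => (p.1 == u) && cond p) := by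
    show (((P.filter cond)).map Prod.fst).countP (· == u) = _
    rw [List.countP_map, List.countP_filter]
    rfl
  rw [hr]
  congr 1
  apply List.countP_congr
  intro p _
  simp [Bool.and_comm]

-- ===== VERDICT (by name: the statement is the Claim_ definition above) =====
theorem solution_spec : Claim_equal_solution := by
  intro id_list report k _ hpre
  show solution id_list report k = solution_alt id_list report k
  rw [solution_eq_map id_list report k hpre, solution_alt_eq_map id_list report k]
  apply List.map_congr_left
  intro u _
  exact pv_core (report.map pvParse) k u
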